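-- pv_equiv track=rewrite | github.com/seok0205/code-solution | programmers/알고리즘_고득점_Kit/해시/260131_L1_폰켓몬.py | solution
-- ===== SOURCE A (Python) =====
-- def solution(nums):
--     N = len(nums)
--     pocket_dic = dict()
--
--     for num in nums:
--         if num not in pocket_dic:
--             pocket_dic[num] = 1
--         else:
--             pocket_dic[num] += 1
--
--     if len(pocket_dic) < (N//2):
--         answer = len(pocket_dic)
--     else:
--         answer = N//2
--
--     return answer
-- ===== SOURCE B (Python) =====
-- def solution(nums):
--     distinct = 0
--     prev = None
--     for x in sorted(nums):
--         if prev is None or x != prev: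
--             distinct += 1
--         prev = x
--     half = len(nums) // 2
--     return distinct if distinct < half else half
-- ===== Notes on version B (the rewrite author's own statement) =====
-- stated objective: alternative
-- what changed: B sorts the list and counts distinct values in one adjacent-comparison scan with a 'previous element' accumulator, instead of A's frequency dictionary; both then take min(distinct, len(nums)//2).
import Mathlib
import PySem

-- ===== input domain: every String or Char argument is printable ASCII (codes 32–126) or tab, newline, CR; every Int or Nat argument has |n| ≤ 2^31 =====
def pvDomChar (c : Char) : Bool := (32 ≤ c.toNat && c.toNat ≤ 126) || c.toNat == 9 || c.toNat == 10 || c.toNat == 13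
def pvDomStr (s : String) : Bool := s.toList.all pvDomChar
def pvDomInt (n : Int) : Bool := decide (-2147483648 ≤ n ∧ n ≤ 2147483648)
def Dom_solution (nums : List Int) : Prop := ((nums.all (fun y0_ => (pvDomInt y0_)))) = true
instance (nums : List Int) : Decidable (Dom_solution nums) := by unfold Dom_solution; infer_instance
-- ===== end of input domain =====

-- B replaces A's hash-map frequency dictionary by a sort-then-adjacent-comparison scan
-- that counts distinct values in one pass over the sorted data (objective: alternative).

-- ===== PORT A =====
def solution (nums : List Int) : Int :=
  let N : Int := (nums.length : Int)
  let pocketDic : PySem.Dict Int Int :=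
    nums.foldl (fun d num =>
      if !(d.contains num) then d.insert num 1 else d.modify num 0 (· + 1))
      PySem.Dict.empty
  if (pocketDic.size : Int) < PySem.Int.floordiv N 2 then (pocketDic.size : Int)
  else PySem.Int.floordiv N 2

-- ===== PORT B =====
-- one step of B's loop: state = (distinct count so far, previous element or none)
def solStepB (st : Int × Option Int) (x : Int) : Int × Option Int :=
  ((match st.2 with
    | none => st.1 + 1
    | some p => if x ≠ p then st.1 + 1 else st.1), some x)

def solution_alt (nums : List Int) : Int :=
  let r := (PySem.List.sorted nums (fun x => x)).foldl solStepB (0, none)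
  let half := PySem.Int.floordiv (nums.length : Int) 2
  if r.1 < half then r.1 else half

-- ===== PRECONDITION & SPEC =====
def Spec_solution (nums : List Int) (out : Int) : Prop := out = solution_alt nums
instance (nums : List Int) (out : Int) : Decidable (Spec_solution nums out) := by unfold Spec_solution; infer_instance

-- ===== CLAIM (what is proved, stated in full; the proofs are below) =====
def Claim_equal_solution : Prop := ∀ (nums : List Int), Dom_solution nums → Spec_solution nums (solution nums)

-- ===== LEMMAS AND PROOFS =====

-- A's branching loop body is, on every dict, exactly Counter's modify step.
lemma solStepA_eq_modify (d : PySem.Dict Int Int) (x : Int) :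
    (if !(d.contains x) then d.insert x 1 else d.modify x 0 (· + 1)) = d.modify x 0 (· + 1) := by
  by_cases h : d.contains x
  · simp [h]
  · have hc : d.contains x = false := by simpa using h
    apply PySem.Dict.ext
    simp [PySem.Dict.modify, PySem.Dict.items_insert, hc,
      PySem.Dict.getD_of_not_contains d 0 hc]

lemma size_eq_keys_length (d : PySem.Dict Int Int) : d.size = d.keys.length := by
  simp [PySem.Dict.size, PySem.Dict.keys]

lemma ofList_length_eq_card (xs : List Int) :
    (PySem.Set.ofList xs).length = xs.toFinset.card := by
  rw [← List.toFinset_card_of_nodup (PySem.Set.nodup_ofList xs)]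
  congr 1
  ext y
  simp [PySem.Set.mem_ofList]

-- A's dictionary ends up with one key per distinct element of nums.
lemma dictA_size (nums : List Int) :
    (nums.foldl (fun d num =>
        if !(d.contains num) then d.insert num 1 else d.modify num 0 (· + 1))
        (PySem.Dict.empty : PySem.Dict Int Int)).size = nums.toFinset.card := by
  rw [PySem.List.foldl_congr_mem nums _ (fun d x => d.modify x 0 (· + 1))
        PySem.Dict.empty (fun acc x hx => solStepA_eq_modify acc x)]
  rw [size_eq_keys_length,
      PySem.Dict.keys_foldl_modify nums 0 (fun _ _ => (· + 1))]
  rw [show (PySem.Dict.empty : PySem.Dict Int Int).keys = [] from rfl]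
  rw [show PySem.Set.update ([] : PySem.Set Int) nums = PySem.Set.ofList nums from
        (PySem.Set.ofList_eq_foldl nums).symm]
  exact ofList_length_eq_card nums

-- B's scan with a previous element p below everything counts |toFinset \ {p}|.
lemma loopB_some (t : List Int) (c p : Int)
    (hs : t.Pairwise (· ≤ ·)) (hp : ∀ y ∈ t, p ≤ y) :
    (t.foldl solStepB (c, some p)).1 = c + ((t.toFinset.erase p).card : Int) := by
  induction t generalizing c p with
  | nil => simp
  | cons x t ih =>
    rcases List.pairwise_cons.mp hs with ⟨hx, ht⟩
    by_cases hxp : x = p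
    · subst hxp
      rw [List.foldl_cons, show solStepB (c, some x) x = (c, some x) by
        simp [solStepB]]
      rw [ih c x ht hx]
      congr 2
      rw [List.toFinset_cons, Finset.erase_insert_eq_erase]
    · have hplt : p < x := lt_of_le_of_ne (hp x (by simp)) (Ne.symm hxp)
      rw [List.foldl_cons, show solStepB (c, some p) x = (c + 1, some x) by
        simp [solStepB, hxp]]
      rw [ih (c + 1) x ht hx]
      have hpnot : p ∉ (x :: t).toFinset := by
        simp only [List.toFinset_cons, Finset.mem_insert, List.mem_toFinset]
        rintro (h | h)
        · exact hxp h.symm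
        · exact absurd (hx p h) (by linarith)
      rw [Finset.erase_eq_of_notMem hpnot]
      have hxmem : x ∈ (x :: t).toFinset := by simp
      have : (x :: t).toFinset = insert x (((x :: t).toFinset).erase x) :=
        (Finset.insert_erase hxmem).symm
      rw [this, Finset.card_insert_of_notMem (Finset.notMem_erase _ _)]
      have : ((x :: t).toFinset).erase x = t.toFinset.erase x := by
        rw [List.toFinset_cons, Finset.erase_insert_eq_erase]
      rw [this]
      push_cast
      ring

lemma loopB_none (s : List Int) (hs : s.Pairwise (· ≤ ·)) :
    (s.foldl solStepB (0, none)).1 = (s.toFinset.card : Int) := by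
  cases s with
  | nil => simp
  | cons x t =>
    rcases List.pairwise_cons.mp hs with ⟨hx, ht⟩
    rw [List.foldl_cons, show solStepB (0, none) x = (1, some x) from rfl]
    rw [loopB_some t 1 x ht hx]
    have hxmem : x ∈ (x :: t).toFinset := by simp
    have h1 : (x :: t).toFinset = insert x (((x :: t).toFinset).erase x) :=
      (Finset.insert_erase hxmem).symm
    have h2 : ((x :: t).toFinset).erase x = t.toFinset.erase x := by
      rw [List.toFinset_cons, Finset.erase_insert_eq_erase]
    rw [h1, Finset.card_insert_of_notMem (Finset.notMem_erase _ _), h2]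
    push_cast
    ring

-- ===== VERDICT (by name: the statement is the Claim_ definition above) =====
theorem solution_spec : Claim_equal_solution := by
  intro nums _
  unfold Spec_solution solution solution_alt
  have hA := dictA_size nums
  have hB : ((PySem.List.sorted nums (fun x => x)).foldl solStepB (0, none)).1
      = (nums.toFinset.card : Int) := by
    rw [loopB_none _ (by simpa using PySem.List.sorted_pairwise nums (fun x => x))]
    rw [List.toFinset_eq_of_perm _ _ (PySem.List.sorted_perm nums (fun x => x) false)]
  simp only [hA, hB]
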